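-- pv_equiv track=rewrite | github.com/nafi-ullah/bgillustration | features/laravelconnection/processdoneapi.py | get_best_german_translation
-- ===== SOURCE A (Python) =====
-- def get_best_german_translation(input_text):
--     messages = [
--         {"en": "Failed to get the selected image. Please capture again.", "de": "Ausgewähltes Bild konnte nicht abgerufen werden. Bitte erneut aufnehmen."},
--         {"en": "Default Crop or Background type or Default Background is not selected properly.", "de": "Standard-Zuschnitt, Hintergrundtyp oder Standardhintergrund wurde nicht korrekt ausgewählt."},
--         {"en": "There is a technical difficulty, please try again later.", "de": "Es liegt ein technisches Problem vor, bitte versuchen Sie es später erneut."},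
--         {"en": "License Plate blur failed. License Plate could not be detected.", "de": "Unschärfe des Kennzeichens fehlgeschlagen. Kennzeichen konnte nicht erkannt werden."},
--         {"en": "License Plate image filling failed. License Plate could not be detected.", "de": "Ausfüllen des Kennzeichenbildes fehlgeschlagen. Kennzeichen konnte nicht erkannt werden."},
--         {"en": "License Plate image filling failed. License Plate image could not be found.", "de": "Ausfüllen des Kennzeichenbildes fehlgeschlagen. Kennzeichenbild konnte nicht gefunden werden."},
--         {"en": "Rim polishing failed. Rim could not be detected.", "de": "Felgenpolitur fehlgeschlagen. Felge konnte nicht erkannt werden."},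
--         {"en": "Car polishing failed.", "de": "Autopolitur fehlgeschlagen."},
--         {"en": "Car reflection could not be added.", "de": "Autospiegelung konnte nicht hinzugefügt werden."},
--         {"en": "Wheels could not be detected. Please capture again.", "de": "Räder konnten nicht erkannt werden. Bitte erneut aufnehmen."},
--         {"en": "Background images are missing. Please configure again.", "de": "Hintergrundbilder fehlen. Bitte erneut konfigurieren."},
--         {"en": "System error occurred. It will be available soon.", "de": "Ein Systemfehler ist aufgetreten. Es wird bald wieder verfügbar sein."},
--         {"en": "Wheel auto generation failed. Wheel could not be detected.", "de": "Automatische Raderzeugung fehlgeschlagen. Rad konnte nicht erkannt werden."},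
--         {"en": "Headlight auto generation failed. Headlight could not be detected.", "de": "Automatische Scheinwerfererzeugung fehlgeschlagen. Scheinwerfer konnte nicht erkannt werden."}
--     ]
--
--     default_de = "Ein Systemfehler ist aufgetreten. Es wird bald wieder verfügbar sein."
--     input_words = set(input_text.lower().split())
--     max_score = 0
--     best_match = None
--
--     for msg in messages:
--         msg_words = set(msg["en"].lower().split())
--         score = len(input_words & msg_words)  # number of common words
--
--         if score > max_score:
--             max_score = score
--             best_match = msg
--
--     # Threshold can be adjusted depending on needs
--     if best_match and max_score > 0:
--         return best_match["de"]
--     else: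
--         return default_de
-- ===== SOURCE B (Python) =====
-- def get_best_german_translation(input_text):
--     messages = [
--         {"en": "Failed to get the selected image. Please capture again.", "de": "Ausgewähltes Bild konnte nicht abgerufen werden. Bitte erneut aufnehmen."},
--         {"en": "Default Crop or Background type or Default Background is not selected properly.", "de": "Standard-Zuschnitt, Hintergrundtyp oder Standardhintergrund wurde nicht korrekt ausgewählt."},
--         {"en": "There is a technical difficulty, please try again later.", "de": "Es liegt ein technisches Problem vor, bitte versuchen Sie es später erneut."},
--         {"en": "License Plate blur failed. License Plate could not be detected.", "de": "Unschärfe des Kennzeichens fehlgeschlagen. Kennzeichen konnte nicht erkannt werden."},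
--         {"en": "License Plate image filling failed. License Plate could not be detected.", "de": "Ausfüllen des Kennzeichenbildes fehlgeschlagen. Kennzeichen konnte nicht erkannt werden."},
--         {"en": "License Plate image filling failed. License Plate image could not be found.", "de": "Ausfüllen des Kennzeichenbildes fehlgeschlagen. Kennzeichenbild konnte nicht gefunden werden."},
--         {"en": "Rim polishing failed. Rim could not be detected.", "de": "Felgenpolitur fehlgeschlagen. Felge konnte nicht erkannt werden."},
--         {"en": "Car polishing failed.", "de": "Autopolitur fehlgeschlagen."},
--         {"en": "Car reflection could not be added.", "de": "Autospiegelung konnte nicht hinzugefügt werden."},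
--         {"en": "Wheels could not be detected. Please capture again.", "de": "Räder konnten nicht erkannt werden. Bitte erneut aufnehmen."},
--         {"en": "Background images are missing. Please configure again.", "de": "Hintergrundbilder fehlen. Bitte erneut konfigurieren."},
--         {"en": "System error occurred. It will be available soon.", "de": "Ein Systemfehler ist aufgetreten. Es wird bald wieder verfügbar sein."},
--         {"en": "Wheel auto generation failed. Wheel could not be detected.", "de": "Automatische Raderzeugung fehlgeschlagen. Rad konnte nicht erkannt werden."},
--         {"en": "Headlight auto generation failed. Headlight could not be detected.", "de": "Automatische Scheinwerfererzeugung fehlgeschlagen. Scheinwerfer konnte nicht erkannt werden."}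
--     ]
--     default_de = "Ein Systemfehler ist aufgetreten. Es wird bald wieder verfügbar sein."
--
--     # inverted index: word -> indices of the messages whose English text contains it
--     index = {}
--     for i, msg in enumerate(messages):
--         for w in dict.fromkeys(msg["en"].lower().split()):
--             index[w] = index.get(w, []) + [i]
--
--     scores = [0] * len(messages)
--     for w in set(input_text.lower().split()):
--         for i in index.get(w, []):
--             scores[i] += 1
--
--     m = max(scores)
--     if m == 0:
--         return default_de
--     return messages[scores.index(m)]["de"]
-- ===== Notes on version B (the rewrite author's own statement) =====
-- stated objective: alternative
-- what changed: Replaced A's per-message set-intersection loop with a running max by a prebuilt inverted index (word -> message indices) accumulated into a score array over the unique input words, followed by a two-phase max/first-index selection.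
import Mathlib
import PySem

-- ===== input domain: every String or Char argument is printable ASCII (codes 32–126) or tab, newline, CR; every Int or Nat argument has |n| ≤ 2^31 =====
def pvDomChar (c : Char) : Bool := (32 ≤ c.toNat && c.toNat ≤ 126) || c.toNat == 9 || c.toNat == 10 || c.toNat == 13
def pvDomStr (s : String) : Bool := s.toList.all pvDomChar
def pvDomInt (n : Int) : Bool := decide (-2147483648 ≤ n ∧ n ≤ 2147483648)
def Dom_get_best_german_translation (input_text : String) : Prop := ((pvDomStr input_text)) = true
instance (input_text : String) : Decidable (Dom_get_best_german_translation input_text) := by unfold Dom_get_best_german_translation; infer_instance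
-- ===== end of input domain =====

-- B replaces A's per-message set intersections by a prebuilt inverted index (word -> message indices)
-- accumulated into a score array, then a two-phase max/first-index selection (objective: alternative).


-- ===== PORT A =====
-- the fixed message table: each Python dict {"en": …, "de": …} becomes the pair (en, de)
def pvMsgs : List (String × String) := [
  ("Failed to get the selected image. Please capture again.", "Ausgewähltes Bild konnte nicht abgerufen werden. Bitte erneut aufnehmen."),
  ("Default Crop or Background type or Default Background is not selected properly.", "Standard-Zuschnitt, Hintergrundtyp oder Standardhintergrund wurde nicht korrekt ausgewählt."),
  ("There is a technical difficulty, please try again later.", "Es liegt ein technisches Problem vor, bitte versuchen Sie es später erneut."),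
  ("License Plate blur failed. License Plate could not be detected.", "Unschärfe des Kennzeichens fehlgeschlagen. Kennzeichen konnte nicht erkannt werden."),
  ("License Plate image filling failed. License Plate could not be detected.", "Ausfüllen des Kennzeichenbildes fehlgeschlagen. Kennzeichen konnte nicht erkannt werden."),
  ("License Plate image filling failed. License Plate image could not be found.", "Ausfüllen des Kennzeichenbildes fehlgeschlagen. Kennzeichenbild konnte nicht gefunden werden."),
  ("Rim polishing failed. Rim could not be detected.", "Felgenpolitur fehlgeschlagen. Felge konnte nicht erkannt werden."),
  ("Car polishing failed.", "Autopolitur fehlgeschlagen."),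
  ("Car reflection could not be added.", "Autospiegelung konnte nicht hinzugefügt werden."),
  ("Wheels could not be detected. Please capture again.", "Räder konnten nicht erkannt werden. Bitte erneut aufnehmen."),
  ("Background images are missing. Please configure again.", "Hintergrundbilder fehlen. Bitte erneut konfigurieren."),
  ("System error occurred. It will be available soon.", "Ein Systemfehler ist aufgetreten. Es wird bald wieder verfügbar sein."),
  ("Wheel auto generation failed. Wheel could not be detected.", "Automatische Raderzeugung fehlgeschlagen. Rad konnte nicht erkannt werden."),
  ("Headlight auto generation failed. Headlight could not be detected.", "Automatische Scheinwerfererzeugung fehlgeschlagen. Scheinwerfer konnte nicht erkannt werden.")]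

def pvDefaultDe : String := "Ein Systemfehler ist aufgetreten. Es wird bald wieder verfügbar sein."

def get_best_german_translation (input_text : String) : String :=
  let input_words : PySem.Set String := PySem.Set.ofList (PySem.Str.split₀ (PySem.Str.lower input_text))
  let r := pvMsgs.foldl (fun (st : Int × Option (String × String)) msg =>
      let msg_words : PySem.Set String := PySem.Set.ofList (PySem.Str.split₀ (PySem.Str.lower msg.1))
      let score : Int := PySem.Set.len (PySem.Set.inter input_words msg_words)
      if st.1 < score then (score, some msg) else st)
    ((0 : Int), (none : Option (String × String)))
  match r.2 with
  | some best => if 0 < r.1 then best.2 else pvDefaultDe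
  | none => pvDefaultDe

-- ===== PORT B =====
-- distinct lowercased words of a message's English text (dict.fromkeys(...) in Source B)
def pvDW (m : String × String) : List String := PySem.List.dedup (PySem.Str.split₀ (PySem.Str.lower m.1))

-- one step of the index-building loop: index[w] = index.get(w, []) + [i]
def pvStep (d : PySem.Dict String (List Int)) (p : Int × (String × String)) : PySem.Dict String (List Int) :=
  (pvDW p.2).foldl (fun d w => d.insert w (d.getD w [] ++ [p.1])) d

-- the inverted index over the fixed message table (input-independent, hoisted out of the function)
def pvIndex : PySem.Dict String (List Int) :=
  (PySem.List.enumerate pvMsgs).foldl pvStep PySem.Dict.empty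

def get_best_german_translation_alt (input_text : String) : String :=
  let words : PySem.Set String := PySem.Set.ofList (PySem.Str.split₀ (PySem.Str.lower input_text))
  let scores := words.foldl
    (fun sc w => (pvIndex.getD w []).foldl
        (fun sc i => PySem.List.pySetD sc i (PySem.List.pyGetD sc i 0 + 1)) sc)
    (List.replicate pvMsgs.length (0 : Int))
  match PySem.List.max? scores (fun x => x) with
  | none => pvDefaultDe   -- unreachable: scores has 14 entries
  | some m =>
    if m = 0 then pvDefaultDe
    else match PySem.List.index? scores m with
      | some i => (pvMsgs.getD i ("", pvDefaultDe)).2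
      | none => pvDefaultDe   -- unreachable: m is an element of scores

-- ===== PRECONDITION & SPEC =====
def Spec_get_best_german_translation (input_text : String) (out : String) : Prop := out = get_best_german_translation_alt input_text
instance (input_text : String) (out : String) : Decidable (Spec_get_best_german_translation input_text out) := by unfold Spec_get_best_german_translation; infer_instance

-- ===== CLAIM (what is proved, stated in full; the proofs are below) =====
def Claim_equal_get_best_german_translation : Prop := ∀ (input_text : String), Dom_get_best_german_translation input_text → Spec_get_best_german_translation input_text (get_best_german_translation input_text)

-- ===== LEMMAS AND PROOFS =====

-- the per-message word-overlap count, as a function of the distinct input words L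
def pvCnt (L : List String) (m : String × String) : Int :=
  (L.countP (fun w => decide (w ∈ pvDW m)) : Int)

-- (L1) inner index-building loop: one message appends its index once per distinct word
theorem pv_inner (ws : List String) (hnd : ws.Nodup) (d : PySem.Dict String (List Int))
    (i : Int) (w : String) :
    ((ws.foldl (fun d u => d.insert u (d.getD u [] ++ [i])) d).getD w [])
      = d.getD w [] ++ (if w ∈ ws then [i] else []) := by
  induction ws generalizing d with
  | nil => simp
  | cons u t ih =>
    simp only [List.foldl_cons]
    rw [ih (by exact hnd.of_cons)]
    rw [PySem.Dict.getD_insert]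
    by_cases hw : w = u
    · subst hw
      have : w ∉ t := (List.nodup_cons.mp hnd).1
      simp [this]
    · simp [hw, List.mem_cons]

-- (L2) the whole index-building fold, over an arbitrary enumerated tail
theorem pv_build (ps : List (Int × (String × String))) (d : PySem.Dict String (List Int)) (w : String) :
    ((ps.foldl pvStep d).getD w [])
      = d.getD w [] ++ ps.filterMap (fun p => if w ∈ pvDW p.2 then some p.1 else none) := by
  induction ps generalizing d with
  | nil => simp
  | cons p t ih =>
    simp only [List.foldl_cons, List.filterMap_cons]
    rw [ih, pvStep, pv_inner (pvDW p.2) (by rw [pvDW]; exact PySem.List.nodup_dedup _)]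
    by_cases hw : w ∈ pvDW p.2 <;> simp [hw]

-- (L3) the postings list of a word
theorem pv_postings (w : String) :
    pvIndex.getD w []
      = (PySem.List.enumerate pvMsgs).filterMap (fun p => if w ∈ pvDW p.2 then some p.1 else none) := by
  rw [pvIndex, pv_build]
  simp [PySem.Dict.getD_empty]

-- (L4) count of an index in a postings-shaped filterMap over an enumeration
theorem pv_enumCount (w : String) (ms : List (String × String)) (s j : Int) :
    ((PySem.List.enumerate ms s).filterMap
        (fun p => if w ∈ pvDW p.2 then some p.1 else none)).count j
      = if s ≤ j ∧ j < s + ms.length ∧ w ∈ pvDW (ms.getD (j - s).toNat ("", "")) then 1 else 0 := by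
  induction ms generalizing s with
  | nil =>
    rw [PySem.List.enumerate_nil]
    simp only [List.filterMap_nil, List.count_nil, List.length_nil]
    rw [eq_comm, if_neg]
    rintro ⟨h1, h2, -⟩
    simp at h2
    omega
  | cons m t ih =>
    rw [PySem.List.enumerate_cons]
    by_cases hm : w ∈ pvDW m <;>
      simp only [List.filterMap_cons, hm, if_true, if_false, List.length_cons]
    · -- word occurs in the head message: the head contributes index s
      rw [List.count_cons, ih (s + 1)]
      by_cases hj : j = s
      · subst hj
        have h0 : (j - j).toNat = 0 := by omega
        simp [hm, show ¬ (j + 1 ≤ j) by omega]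
      · have hg : (s == j) = false := by simp; omega
        rw [hg]
        simp only [if_false, add_zero, Bool.false_eq_true]
        by_cases hs : s + 1 ≤ j
        · have h1 : (j - s).toNat = (j - (s + 1)).toNat + 1 := by omega
          rw [h1, List.getD_cons_succ]
          refine if_congr ?_ rfl rfl
          constructor <;> rintro ⟨a, b, c⟩ <;> refine ⟨by omega, by push_cast at b ⊢; omega, c⟩
        · rw [if_neg (by rintro ⟨a, b, c⟩; omega), if_neg (by rintro ⟨a, b, c⟩; omega)]
    · -- word not in the head message: no contribution from index s
      rw [ih (s + 1)]
      by_cases hj : j = s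
      · subst hj
        have h0 : (j - j).toNat = 0 := by omega
        rw [if_neg (by rintro ⟨a, b, c⟩; omega),
            if_neg (by rw [h0]; rintro ⟨a, b, c⟩; exact hm (by simpa using c))]
      · by_cases hs : s + 1 ≤ j
        · have h1 : (j - s).toNat = (j - (s + 1)).toNat + 1 := by omega
          rw [h1, List.getD_cons_succ]
          refine if_congr ?_ rfl rfl
          constructor <;> rintro ⟨a, b, c⟩ <;> refine ⟨by omega, by push_cast at b ⊢; omega, c⟩
        · rw [if_neg (by rintro ⟨a, b, c⟩; omega), if_neg (by rintro ⟨a, b, c⟩; omega)]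

theorem pvMsgs_length : pvMsgs.length = 14 := rfl

-- bounds of the postings lists
theorem pv_post_bounds (w : String) : ∀ i ∈ pvIndex.getD w [], 0 ≤ i ∧ i < 14 := by
  intro i hi
  by_contra hcon
  have hc : 0 < (pvIndex.getD w []).count i := List.count_pos_iff.mpr hi
  rw [pv_postings, pv_enumCount w pvMsgs 0 i] at hc
  rw [if_neg (by rw [pvMsgs_length]; rintro ⟨a, b, -⟩; push_cast at b; omega)] at hc
  omega

-- count of a fixed message index in a word's postings list
theorem pv_post_count (w : String) (j : Nat) (hj : j < 14) :
    (pvIndex.getD w []).count (j : Int)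
      = if w ∈ pvDW (pvMsgs.getD j ("", "")) then 1 else 0 := by
  rw [pv_postings, pv_enumCount w pvMsgs 0 j]
  have h1 : ((j : Int) - 0).toNat = j := by omega
  rw [h1]
  refine if_congr ?_ rfl rfl
  rw [pvMsgs_length]
  constructor
  · rintro ⟨-, -, c⟩; exact c
  · intro c; exact ⟨by omega, by push_cast; omega, c⟩

-- (L5) increment fold over a postings list
theorem pv_inc (P : List Int) (sc : List Int) (hP : ∀ i ∈ P, 0 ≤ i ∧ i < (sc.length : Int)) :
    ((P.foldl (fun sc i => PySem.List.pySetD sc i (PySem.List.pyGetD sc i 0 + 1)) sc).length = sc.length)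
    ∧ ∀ (j : Nat), j < sc.length →
        (P.foldl (fun sc i => PySem.List.pySetD sc i (PySem.List.pyGetD sc i 0 + 1)) sc).getD j 0
          = sc.getD j 0 + P.count ((j : Nat) : Int) := by
  induction P generalizing sc with
  | nil => exact ⟨rfl, fun j hj => by simp⟩
  | cons i P ih =>
    obtain ⟨hi0, hilen⟩ := hP i (by simp)
    simp only [List.foldl_cons]
    rw [PySem.List.pySetD_of_nonneg _ _ hi0,
        PySem.List.pyGetD_eq_getElem _ _ hi0 hilen]
    set sc' := sc.set i.toNat (sc[i.toNat] + 1) with hsc'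
    have hlen' : sc'.length = sc.length := by rw [hsc', List.length_set]
    obtain ⟨ihl, ihv⟩ := ih sc' (fun q hq => by rw [hlen']; exact hP q (by simp [hq]))
    refine ⟨by rw [ihl, hlen'], fun j hj => ?_⟩
    rw [ihv j (by rw [hlen']; exact hj), List.count_cons]
    rw [List.getD_eq_getElem?_getD, List.getD_eq_getElem?_getD, hsc', List.getElem?_set]
    by_cases he : i.toNat = j
    · have hb : (i == (j : Int)) = true := by simp; omega
      subst he
      rw [hb, if_pos rfl, if_pos (by omega), List.getElem?_eq_getElem hj]
      simp only [Option.getD_some, if_true]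
      push_cast
      omega
    · have hb : (i == (j : Int)) = false := by simp; omega
      rw [hb, if_neg he]
      simp only [Bool.false_eq_true, if_false]
      omega

-- (L6) the score array computed by B equals the per-message overlap counts
theorem pv_scores (L : List String) (sc : List Int) (hlen : sc.length = 14) :
    ((L.foldl
        (fun sc w => (pvIndex.getD w []).foldl
          (fun sc i => PySem.List.pySetD sc i (PySem.List.pyGetD sc i 0 + 1)) sc) sc).length = 14)
    ∧ ∀ (j : Nat), j < 14 →
        (L.foldl
          (fun sc w => (pvIndex.getD w []).foldl
            (fun sc i => PySem.List.pySetD sc i (PySem.List.pyGetD sc i 0 + 1)) sc) sc).getD j 0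
          = sc.getD j 0 + pvCnt L (pvMsgs.getD j ("", "")) := by
  induction L generalizing sc with
  | nil => exact ⟨hlen, fun j hj => by simp [pvCnt]⟩
  | cons w L ih =>
    simp only [List.foldl_cons]
    obtain ⟨hl1, hv1⟩ := pv_inc (pvIndex.getD w []) sc
      (fun q hq => by have := pv_post_bounds w q hq; omega)
    obtain ⟨ihl, ihv⟩ := ih _ (by rw [hl1, hlen])
    refine ⟨ihl, fun j hj => ?_⟩
    rw [ihv j hj, hv1 j (by omega), pv_post_count w j hj]
    simp only [pvCnt, List.countP_cons]
    by_cases hm : w ∈ pvDW (pvMsgs.getD j ("", "")) <;> simp only [hm, decide_true,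
      decide_false, if_true, if_false, Bool.false_eq_true] <;> push_cast <;> omega

-- the selection loop of A, abstracted over (score, message) pairs
def pvSel (l : List (Int × (String × String))) (st : Int × Option (String × String)) :
    Int × Option (String × String) :=
  l.foldl (fun st p => if st.1 < p.1 then (p.1, some p.2) else st) st

-- (S1) the running maximum
theorem pvSel_fst (l : List (Int × (String × String))) (st : Int × Option (String × String)) :
    (pvSel l st).1 = (l.map Prod.fst).foldl max st.1 := by
  induction l generalizing st with
  | nil => rfl
  | cons p t ih =>
    simp only [pvSel, List.foldl_cons, List.map_cons] at *
    rw [ih]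
    by_cases h : st.1 < p.1
    · simp [h, max_eq_right h.le]
    · simp [h, max_eq_left (not_lt.mp h)]

-- (S2) no strict improvement: the state is unchanged
theorem pvSel_const (l : List (Int × (String × String))) (st : Int × Option (String × String))
    (h : ∀ p ∈ l, p.1 ≤ st.1) : pvSel l st = st := by
  induction l generalizing st with
  | nil => rfl
  | cons p t ih =>
    simp only [pvSel, List.foldl_cons]
    have hp : ¬ st.1 < p.1 := not_lt.mpr (h p (by simp))
    rw [if_neg hp]
    exact ih st (fun q hq => h q (by simp [hq]))

-- (S0) a strictly improved fold maximum is attained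
theorem pv_max_mem (t : List Int) (a : Int) (h : a < t.foldl max a) : t.foldl max a ∈ t := by
  induction t generalizing a with
  | nil => simp at h
  | cons x r ih =>
    simp only [List.foldl_cons] at *
    by_cases hx : max a x = x
    · by_cases hr : x < r.foldl max x
      · exact List.mem_cons_of_mem _ (by rw [hx] at h ⊢; exact ih x hr)
      · have h1 := (PySem.List.le_foldl_max r x).1
        have h2 : r.foldl max x = x := le_antisymm (not_lt.mp hr) h1
        rw [hx, h2]
        simp
    · have hax : max a x = a := by
        rcases max_choice a x with h' | h'
        · exact h'
        · exact absurd h' hx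
      rw [hax] at h ⊢
      exact List.mem_cons_of_mem _ (ih a h)

-- (S3) the first strict-improvement winner is the first maximum
theorem pvSel_snd (l : List (Int × (String × String))) (st : Int × Option (String × String))
    (M : Int) (hM : M = (l.map Prod.fst).foldl max st.1) (hlt : st.1 < M) :
    (pvSel l st).2 = (l.find? (fun p => p.1 == M)).map Prod.snd := by
  induction l generalizing st with
  | nil => simp at hM; omega
  | cons p t ih =>
    simp only [List.map_cons, List.foldl_cons] at hM
    simp only [pvSel, List.foldl_cons, List.find?_cons]
    by_cases h : st.1 < p.1
    · rw [if_pos h]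
      rw [max_eq_right h.le] at hM
      by_cases hMp : p.1 = M
      · have hb : (p.1 == M) = true := by simp [hMp]
        rw [hb]
        have hle : ∀ q ∈ t, q.1 ≤ p.1 := by
          intro q hq
          have h2 := (PySem.List.le_foldl_max (t.map Prod.fst) p.1).2 q.1 (List.mem_map_of_mem hq)
          rw [← hM] at h2
          omega
        have h3 := pvSel_const t (p.1, some p.2) hle
        simpa [pvSel] using congrArg Prod.snd h3
      · have hlt' : p.1 < M := by
          have h2 := (PySem.List.le_foldl_max (t.map Prod.fst) p.1).1
          rw [← hM] at h2
          omega
        have hb : (p.1 == M) = false := by simp; omega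
        rw [hb]
        exact ih (p.1, some p.2) hM hlt'
    · rw [if_neg h]
      rw [max_eq_left (not_lt.mp h)] at hM
      have hb : (p.1 == M) = false := by
        simp
        have h2 := (PySem.List.le_foldl_max (t.map Prod.fst) st.1).1
        omega
      rw [hb]
      exact ih st hM hlt

-- (S4) first index of M among the scores names the first message achieving M
theorem pv_index_find (L : List String) (ms : List (String × String)) (M : Int) :
    (PySem.List.index? (ms.map (fun m => pvCnt L m)) M).map
        (fun i => ms.getD i ("", pvDefaultDe))
      = ((ms.map (fun m => (pvCnt L m, m))).find? (fun p => p.1 == M)).map Prod.snd := by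
  induction ms with
  | nil => simp [PySem.List.index?]
  | cons m t ih =>
    simp only [List.map_cons, List.find?_cons]
    by_cases h : pvCnt L m = M
    · rw [h, PySem.List.index?_cons_self]
      simp
    · rw [PySem.List.index?_cons_of_ne _ h]
      have hb : ((pvCnt L m, m).1 == M) = false := by simp [h]
      rw [hb, ← ih]
      cases PySem.List.index? (t.map (fun m => pvCnt L m)) M <;> simp

-- maximum of a nonempty list of nonnegative ints, as Python's max
theorem pv_max?_nonneg (l : List Int) (hne : l ≠ []) (hpos : ∀ x ∈ l, 0 ≤ x) :
    PySem.List.max? l (fun x => x) = some (l.foldl max 0) := by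
  obtain ⟨x, t, rfl⟩ := List.exists_cons_of_ne_nil hne
  rw [PySem.List.max?_id_cons, List.foldl_cons, max_eq_right (hpos x (by simp))]

-- the heart of the equivalence, stated over the distinct input-word list L
theorem pv_main (L : List String) :
    (let r := pvMsgs.foldl (fun (st : Int × Option (String × String)) msg =>
        let msg_words : PySem.Set String := PySem.Set.ofList (PySem.Str.split₀ (PySem.Str.lower msg.1))
        let score : Int := PySem.Set.len (PySem.Set.inter L msg_words)
        if st.1 < score then (score, some msg) else st) ((0 : Int), (none : Option (String × String)))
     match r.2 with
     | some best => if 0 < r.1 then best.2 else pvDefaultDe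
     | none => pvDefaultDe)
    =
    (let scores := L.foldl
        (fun sc w => (pvIndex.getD w []).foldl
          (fun sc i => PySem.List.pySetD sc i (PySem.List.pyGetD sc i 0 + 1)) sc)
        (List.replicate pvMsgs.length (0 : Int))
     match PySem.List.max? scores (fun x => x) with
     | none => pvDefaultDe
     | some m =>
       if m = 0 then pvDefaultDe
       else match PySem.List.index? scores m with
         | some i => (pvMsgs.getD i ("", pvDefaultDe)).2
         | none => pvDefaultDe) := by
  have hscore : ∀ m : String × String,
      PySem.Set.len (PySem.Set.inter L (PySem.Set.ofList (PySem.Str.split₀ (PySem.Str.lower m.1))))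
        = pvCnt L m := by
    intro m
    simp only [PySem.Set.len, PySem.Set.inter, pvCnt]
    congr 1
    rw [← List.countP_eq_length_filter]
    refine List.countP_congr (fun x _ => ?_)
    rw [PySem.Set.contains_iff, decide_eq_true_iff, pvDW, PySem.List.dedup_eq_ofList]
  simp only [hscore]
  have hAfold : pvMsgs.foldl (fun (st : Int × Option (String × String)) msg =>
      if st.1 < pvCnt L msg then (pvCnt L msg, some msg) else st)
        ((0 : Int), (none : Option (String × String)))
      = pvSel (pvMsgs.map (fun m => (pvCnt L m, m))) (0, none) := by
    rw [pvSel, List.foldl_map]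
  rw [hAfold]
  obtain ⟨hlen, hget⟩ := pv_scores L (List.replicate pvMsgs.length (0 : Int))
    (by simp [pvMsgs_length])
  have hS : L.foldl
      (fun sc w => (pvIndex.getD w []).foldl
        (fun sc i => PySem.List.pySetD sc i (PySem.List.pyGetD sc i 0 + 1)) sc)
      (List.replicate pvMsgs.length (0 : Int))
      = pvMsgs.map (fun m => pvCnt L m) := by
    apply List.ext_getElem (by rw [hlen]; simp [pvMsgs_length])
    intro j h1 h2
    have h14 : j < 14 := by rw [hlen] at h1; exact h1
    have hv := hget j h14
    rw [List.getD_eq_getElem _ 0 h1] at hv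
    have hrep : (List.replicate pvMsgs.length (0 : Int)).getD j 0 = 0 := by
      rw [List.getD_eq_getElem _ _ (by rw [List.length_replicate, pvMsgs_length]; exact h14)]
      simp
    rw [hv, hrep, zero_add, List.getElem_map]
    congr 1
    exact List.getD_eq_getElem _ _ (by rw [pvMsgs_length]; exact h14)
  rw [hS]
  have hmapfst : (pvMsgs.map (fun m => (pvCnt L m, m))).map Prod.fst
      = pvMsgs.map (fun m => pvCnt L m) := by simp
  have hlen14 : (pvMsgs.map (fun m => pvCnt L m)).length = 14 := by
    rw [List.length_map, pvMsgs_length]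
  have hne : pvMsgs.map (fun m => pvCnt L m) ≠ [] :=
    List.ne_nil_of_length_pos (by omega)
  have hpos : ∀ x ∈ pvMsgs.map (fun m => pvCnt L m), 0 ≤ x := by
    intro x hx
    obtain ⟨m, -, rfl⟩ := List.mem_map.mp hx
    exact Int.natCast_nonneg _
  rw [pv_max?_nonneg _ hne hpos]
  set M : Int := (pvMsgs.map (fun m => pvCnt L m)).foldl max 0 with hMdef
  show _ = (if M = 0 then pvDefaultDe
    else match PySem.List.index? (pvMsgs.map (fun m => pvCnt L m)) M with
      | some i => (pvMsgs.getD i ("", pvDefaultDe)).2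
      | none => pvDefaultDe)
  have hfst : (pvSel (pvMsgs.map (fun m => (pvCnt L m, m))) (0, none)).1 = M := by
    rw [pvSel_fst, hmapfst]
  by_cases hM : M = 0
  · rw [if_pos hM]
    cases h2 : (pvSel (pvMsgs.map (fun m => (pvCnt L m, m))) (0, none)).2 with
    | none => rfl
    | some best =>
      have : ¬ (0 < (pvSel (pvMsgs.map (fun m => (pvCnt L m, m))) (0, none)).1) := by
        rw [hfst, hM]; omega
      simp [this]
  · rw [if_neg hM]
    have hMpos : 0 < M := by
      have h0 := (PySem.List.le_foldl_max (pvMsgs.map (fun m => pvCnt L m)) 0).1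
      rw [← hMdef] at h0
      omega
    have hMpos' : 0 < (pvMsgs.map (fun m => pvCnt L m)).foldl max 0 := by
      rw [← hMdef]; exact hMpos
    have hmem : M ∈ pvMsgs.map (fun m => pvCnt L m) := by
      rw [hMdef]; exact pv_max_mem _ 0 hMpos'

    obtain ⟨i, hidx⟩ := Option.isSome_iff_exists.mp
      ((PySem.List.index?_isSome_iff _ _).mpr hmem)
    rw [hidx]
    have hfind := pv_index_find L pvMsgs M
    rw [hidx] at hfind
    have hsnd : (pvSel (pvMsgs.map (fun m => (pvCnt L m, m))) (0, none)).2
        = some (pvMsgs.getD i ("", pvDefaultDe)) := by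
      rw [pvSel_snd _ _ M (by rw [hmapfst, hMdef]) hMpos, ← hfind]
      rfl
    rw [hsnd]
    simp only [hfst]
    rw [if_pos hMpos]

-- ===== VERDICT (by name: the statement is the Claim_ definition above) =====
theorem get_best_german_translation_spec : Claim_equal_get_best_german_translation := by
  intro input_text _
  unfold Spec_get_best_german_translation get_best_german_translation get_best_german_translation_alt
  exact pv_main (PySem.Set.ofList (PySem.Str.split₀ (PySem.Str.lower input_text)))
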